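-- pv_equiv track=rewrite | github.com/shayd3/aoc-2022 | aoc202206/aoc202206.py | part1
-- ===== SOURCE A (Python) =====
-- def part1(data):
--     """Solve part 1."""
--     # Keep track of window of 4 characters
--     sequence_window = []
--     for i, char in enumerate(data):
--         sequence_window.append(char)
--         if len(sequence_window) == 4:
--             if len(set(sequence_window)) == 4:
--                 return i + 1
--             else:
--                 sequence_window.pop(0)
-- ===== SOURCE B (Python) =====
-- def part1(data):
--     """Solve part 1."""
--     # Single pass with last-seen indices and a jumping window-start pointer.
--     seen = {}
--     start = 0
--     for i, char in enumerate(data):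
--         if char in seen and seen[char] >= start:
--             start = seen[char] + 1
--         seen[char] = i
--         if i - start + 1 == 4:
--             return i + 1
--     return None
-- ===== Notes on version B (the rewrite author's own statement) =====
-- stated objective: alternative
-- what changed: B replaces A's mutable 4-char window list (append/pop) with a per-step set() rebuild by a dict of each character's last-seen index plus a window-start pointer that jumps past the previous occurrence; the window is never materialised.
import Mathlib
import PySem

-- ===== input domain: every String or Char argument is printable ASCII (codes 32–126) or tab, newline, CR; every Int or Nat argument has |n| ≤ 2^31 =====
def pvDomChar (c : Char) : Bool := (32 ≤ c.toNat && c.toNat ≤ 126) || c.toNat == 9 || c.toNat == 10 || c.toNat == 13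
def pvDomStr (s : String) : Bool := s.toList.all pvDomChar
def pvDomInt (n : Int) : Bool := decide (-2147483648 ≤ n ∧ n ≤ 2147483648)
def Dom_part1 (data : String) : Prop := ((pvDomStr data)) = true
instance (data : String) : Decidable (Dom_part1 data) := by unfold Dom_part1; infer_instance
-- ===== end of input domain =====

-- B replaces A's mutable 4-char window list rebuilt with append/pop and a per-step
-- set() by a dict of last-seen indices plus a jumping window-start pointer
-- (objective: alternative — a different data structure, same O(n) cost).

-- ===== PORT A =====
-- A's loop: enumerate(data), append to window, on length 4 test set size, else pop(0).
def part1Loop (cs : List Char) (i : Nat) (win : List Char) : Option Int :=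
  match cs with
  | [] => none
  | c :: rest =>
    if (win ++ [c]).length = 4 then                          -- sequence_window.append(char)
      if (PySem.Set.ofList (win ++ [c])).length = 4 then some ((i : Int) + 1)
      else part1Loop rest (i + 1) ((win ++ [c]).drop 1)      -- sequence_window.pop(0)
    else part1Loop rest (i + 1) (win ++ [c])

def part1 (data : String) : Option Int := part1Loop data.toList 0 []

-- ===== PORT B =====
-- B's loop: seen = last-seen index dict, start = window-start pointer;
-- 'if char in seen and seen[char] >= start: start = seen[char] + 1', then
-- 'seen[char] = i', then 'if i - start + 1 == 4: return i + 1'.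
def part1AltLoop (cs : List Char) (i : Nat) (seen : PySem.Dict Char Int) (start : Int) :
    Option Int :=
  match cs with
  | [] => none
  | c :: rest =>
    let start' :=
      match seen.get? c with
      | some j => if start ≤ j then j + 1 else start
      | none => start
    let seen' := seen.insert c (i : Int)
    if (i : Int) - start' + 1 = 4 then some ((i : Int) + 1)
    else part1AltLoop rest (i + 1) seen' start'

def part1_alt (data : String) : Option Int :=
  part1AltLoop data.toList 0 PySem.Dict.empty 0

-- ===== PRECONDITION & SPEC =====
def Spec_part1 (data : String) (out : Option Int) : Prop := out = part1_alt data
instance (data : String) (out : Option Int) : Decidable (Spec_part1 data out) := by unfold Spec_part1; infer_instance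

-- ===== CLAIM =====
def Claim_equal_part1 : Prop := ∀ (data : String), Dom_part1 data → Spec_part1 data (part1 data)

-- ===== LEMMAS AND PROOFS =====

-- Common intermediate: scan indices checking the 4 chars ending at i pairwise distinct.
def scanGo (cs : List Char) (i : Nat) : Option Int :=
  if h : i < cs.length then
    if cs[i - 3]'(by omega) ≠ cs[i - 2]'(by omega) ∧ cs[i - 3]'(by omega) ≠ cs[i - 1]'(by omega) ∧
       cs[i - 3]'(by omega) ≠ cs[i]'h ∧ cs[i - 2]'(by omega) ≠ cs[i - 1]'(by omega) ∧
       cs[i - 2]'(by omega) ≠ cs[i]'h ∧ cs[i - 1]'(by omega) ≠ cs[i]'h then some ((i : Int) + 1)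
    else scanGo cs (i + 1)
  else none
termination_by cs.length - i

-- ---------- A-side: part1Loop = scanGo ----------

theorem set4_length (a b c d : Char) :
    ((PySem.Set.ofList [a, b, c, d]).length = 4) ↔
      (a ≠ b ∧ a ≠ c ∧ a ≠ d ∧ b ≠ c ∧ b ≠ d ∧ c ≠ d) := by
  by_cases hab : a = b <;> by_cases hac : a = c <;> by_cases had : a = d <;>
    by_cases hbc : b = c <;> by_cases hbd : b = d <;> by_cases hcd : c = d <;>
    simp_all [PySem.Set.ofList, PySem.Set.add, PySem.Set.contains, List.foldl] <;>
    (try split_ifs <;> simp_all) <;> tauto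

theorem take3_drop (cs : List Char) (i : Nat) (h : i + 2 < cs.length) :
    (cs.drop i).take 3 = [cs[i], cs[i + 1], cs[i + 2]] := by
  rw [List.drop_eq_getElem_cons (show i < cs.length by omega), List.take_succ_cons,
      List.drop_eq_getElem_cons (show i + 1 < cs.length by omega), List.take_succ_cons,
      List.drop_eq_getElem_cons (show i + 2 < cs.length by omega), List.take_succ_cons,
      List.take_zero]

theorem mainL (cs : List Char) (i : Nat) (h3 : 3 ≤ i) :
    part1Loop (cs.drop i) i ((cs.drop (i - 3)).take 3) = scanGo cs i := by
  by_cases h : i < cs.length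
  · have hwin : (cs.drop (i - 3)).take 3 = [cs[i - 3], cs[i - 2], cs[i - 1]] := by
      rw [take3_drop cs (i - 3) (by omega)]
      simp only [show i - 3 + 1 = i - 2 from by omega, show i - 3 + 2 = i - 1 from by omega]
    rw [List.drop_eq_getElem_cons h, hwin, part1Loop,
        show ([cs[i - 3], cs[i - 2], cs[i - 1]] ++ [cs[i]]) = [cs[i - 3], cs[i - 2], cs[i - 1], cs[i]] from rfl,
        if_pos (show ([cs[i - 3], cs[i - 2], cs[i - 1], cs[i]] : List Char).length = 4 from rfl)]
    by_cases hset : (PySem.Set.ofList [cs[i - 3], cs[i - 2], cs[i - 1], cs[i]]).length = 4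
    · rw [if_pos hset]
      conv_rhs => rw [scanGo]
      rw [dif_pos h, if_pos ((set4_length _ _ _ _).mp hset)]
    · rw [if_neg hset]
      have hrec := mainL cs (i + 1) (by omega)
      have hwin' : (cs.drop (i + 1 - 3)).take 3 = [cs[i - 2], cs[i - 1], cs[i]] := by
        rw [take3_drop cs (i + 1 - 3) (by omega)]
        simp only [show i + 1 - 3 = i - 2 from by omega, show i - 2 + 1 = i - 1 from by omega,
          show i - 2 + 2 = i from by omega]
      rw [show ([cs[i - 3], cs[i - 2], cs[i - 1], cs[i]].drop 1) = [cs[i - 2], cs[i - 1], cs[i]] from rfl,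
          ← hwin', hrec]
      conv_rhs => rw [scanGo]
      rw [dif_pos h, if_neg (fun hc => hset ((set4_length _ _ _ _).mpr hc))]
  · rw [List.drop_eq_nil_of_le (by omega), part1Loop, scanGo, dif_neg h]
termination_by cs.length - i

theorem part1_eq_scan (cs : List Char) : part1Loop cs 0 [] = scanGo cs 3 := by
  match cs with
  | [] => rw [part1Loop, scanGo, dif_neg (by simp)]
  | [a] =>
    rw [part1Loop, if_neg (by simp), part1Loop, scanGo, dif_neg (by simp)]
  | [a, b] =>
    rw [part1Loop, if_neg (by simp), part1Loop, if_neg (by simp), part1Loop, scanGo,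
        dif_neg (by simp)]
  | a :: b :: c :: rest =>
    rw [part1Loop, if_neg (by simp), part1Loop, if_neg (by simp), part1Loop, if_neg (by simp)]
    have := mainL (a :: b :: c :: rest) 3 (by omega)
    simpa using this

-- ---------- B-side: part1AltLoop = scanGo ----------

-- the window L[s..i) as a list
def sliceW (L : List Char) (s i : Nat) : List Char := (L.drop s).take (i - s)

theorem sliceW_snoc (L : List Char) (s i : Nat) (hs : s ≤ i) (hi : i < L.length) :
    sliceW L s (i + 1) = sliceW L s i ++ [L[i]] := by
  unfold sliceW
  rw [show i + 1 - s = (i - s) + 1 from by omega, List.take_add_one]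
  congr 1
  rw [List.getElem?_drop, show s + (i - s) = i from by omega,
      List.getElem?_eq_getElem hi]
  rfl

theorem sliceW_getElem? (L : List Char) (s i k : Nat) (hk : k < i - s) :
    (sliceW L s i)[k]? = L[s + k]? := by
  unfold sliceW
  rw [List.getElem?_take_of_lt hk, List.getElem?_drop]

theorem sliceW_length (L : List Char) (s i : Nat) (_hs : s ≤ i) (hi : i ≤ L.length) :
    (sliceW L s i).length = i - s := by
  unfold sliceW; simp; omega

-- two equal chars inside a window make it not-Nodup
theorem not_nodup_of_dup (L : List Char) (t j i : Nat) (htj : t ≤ j) (hji : j < i)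
    (hi : i < L.length) (heq : L[j]'(by omega) = L[i]) :
    ¬ (sliceW L t (i + 1)).Nodup := by
  intro hnd
  have h1 : (sliceW L t (i + 1))[j - t]? = L[j]? := by
    rw [sliceW_getElem? L t (i + 1) (j - t) (by omega), show t + (j - t) = j from by omega]
  have h2 : (sliceW L t (i + 1))[i - t]? = L[i]? := by
    rw [sliceW_getElem? L t (i + 1) (i - t) (by omega), show t + (i - t) = i from by omega]
  have hlen : j - t < (sliceW L t (i + 1)).length := by
    rw [sliceW_length L t (i + 1) (by omega) (by omega)]; omega
  have heq2 : (sliceW L t (i + 1))[j - t]? = (sliceW L t (i + 1))[i - t]? := by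
    rw [h1, h2, List.getElem?_eq_getElem (show j < L.length by omega),
        List.getElem?_eq_getElem hi, heq]
  have := List.getElem?_inj hlen hnd heq2
  omega

-- a smaller window (larger start) of a Nodup window is Nodup
theorem nodup_mono_start (L : List Char) (t s i : Nat) (hts : t ≤ s)
    (hnd : (sliceW L t i).Nodup) : (sliceW L s i).Nodup := by
  have heq : sliceW L s i = (sliceW L t i).drop (s - t) := by
    unfold sliceW
    rw [List.drop_take, List.drop_drop, show t + (s - t) = s from by omega,
        show i - t - (s - t) = i - s from by omega]
  rw [heq]
  exact hnd.sublist (List.drop_sublist _ _)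

-- a shorter window (smaller end) of a Nodup window is Nodup
theorem nodup_mono_end (L : List Char) (t i : Nat) (ht : t ≤ i)
    (hnd : (sliceW L t (i + 1)).Nodup) : (sliceW L t i).Nodup := by
  have heq : sliceW L t i = (sliceW L t (i + 1)).take (i - t) := by
    unfold sliceW
    rw [List.take_take, show min (i - t) (i + 1 - t) = i - t from by omega]
  rw [heq]
  exact hnd.sublist (List.take_sublist _ _)

theorem mem_sliceW (L : List Char) (s i : Nat) (c : Char) (hc : c ∈ sliceW L s i) :
    ∃ j, s ≤ j ∧ j < i ∧ L[j]? = some c := by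
  obtain ⟨k, hk, hget⟩ := List.mem_iff_getElem.mp hc
  have hki : k < i - s := by
    have hle : (sliceW L s i).length ≤ i - s := List.length_take_le _ _
    omega
  refine ⟨s + k, by omega, by omega, ?_⟩
  rw [← sliceW_getElem? L s i k hki, List.getElem?_eq_getElem hk, hget]

-- last index j < i with L[j] = c
def lastBefore (L : List Char) : Nat → Char → Option Nat
  | 0, _ => none
  | i + 1, c => if L[i]? = some c then some i else lastBefore L i c

theorem lastBefore_some (L : List Char) (i : Nat) (c : Char) (j : Nat)
    (h : lastBefore L i c = some j) : j < i ∧ L[j]? = some c := by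
  induction i with
  | zero => simp [lastBefore] at h
  | succ n ih =>
    rw [lastBefore] at h
    split_ifs at h with hn
    · cases h; exact ⟨by omega, hn⟩
    · obtain ⟨h1, h2⟩ := ih h; exact ⟨by omega, h2⟩

theorem lastBefore_ge (L : List Char) (i : Nat) (c : Char) (j : Nat)
    (hji : j < i) (hj : L[j]? = some c) :
    ∃ k, lastBefore L i c = some k ∧ j ≤ k := by
  induction i with
  | zero => omega
  | succ n ih =>
    rw [lastBefore]
    by_cases hn : L[n]? = some c
    · exact ⟨n, by rw [if_pos hn], by omega⟩
    · rw [if_neg hn]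
      rcases Nat.lt_or_ge j n with h | h
      · exact ih h
      · have : j = n := by omega
        subst this; exact absurd hj hn

theorem sliceW_four (L : List Char) (i : Nat) (h3 : 3 ≤ i) (hi : i < L.length) :
    sliceW L (i - 3) (i + 1) =
      [L[i - 3]'(by omega), L[i - 2]'(by omega), L[i - 1]'(by omega), L[i]] := by
  unfold sliceW
  rw [show i + 1 - (i - 3) = 4 from by omega,
      List.drop_eq_getElem_cons (show i - 3 < L.length by omega), List.take_succ_cons,
      List.drop_eq_getElem_cons (show i - 3 + 1 < L.length by omega), List.take_succ_cons,
      List.drop_eq_getElem_cons (show i - 3 + 2 < L.length by omega), List.take_succ_cons,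
      List.drop_eq_getElem_cons (show i - 3 + 3 < L.length by omega), List.take_succ_cons,
      List.take_zero]
  simp only [show i - 3 + 1 = i - 2 from by omega, show i - 3 + 2 = i - 1 from by omega,
      show i - 3 + 3 = i from by omega]

theorem nodup_four (a b c d : Char) :
    ([a, b, c, d] : List Char).Nodup ↔
      (a ≠ b ∧ a ≠ c ∧ a ≠ d ∧ b ≠ c ∧ b ≠ d ∧ c ≠ d) := by
  simp [List.nodup_cons]; tauto

-- main invariant lemma for B's loop
theorem altMain (L : List Char) (i s : Nat) (seen : PySem.Dict Char Int)
    (hsi : s ≤ i) (hw : i - s ≤ 3)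
    (hnd : (sliceW L s i).Nodup)
    (hmin : ∀ t, t < s → ¬ (sliceW L t i).Nodup)
    (hseen : ∀ c, seen.get? c = (lastBefore L i c).map (fun n => (n : Int))) :
    part1AltLoop (L.drop i) i seen (s : Int) = scanGo L i := by
  by_cases h : i < L.length
  · rw [List.drop_eq_getElem_cons h, part1AltLoop]
    set c := L[i] with hc
    -- the new start pointer, as a natural number
    set s' : Nat := (match lastBefore L i c with
      | some j => if s ≤ j then j + 1 else s
      | none => s) with hs'def
    have hstart' :
        (match seen.get? c with
          | some j => if (s : Int) ≤ j then j + 1 else (s : Int)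
          | none => (s : Int)) = (s' : Int) := by
      cases hocc : lastBefore L i c with
      | none => simp [hseen c, hocc, hs'def]
      | some j =>
        by_cases hsj : s ≤ j
        · have hsjI : (s : Int) ≤ (j : Int) := by exact_mod_cast hsj
          simp [hseen c, hocc, hs'def, hsj, hsjI]
        · have hsjI : ¬ (s : Int) ≤ (j : Int) := by exact_mod_cast hsj
          simp [hseen c, hocc, hs'def, hsj, hsjI]
    -- (P1) s ≤ s' ≤ i
    have hP1 : s ≤ s' ∧ s' ≤ i := by
      rw [hs'def]
      cases hocc : lastBefore L i c with
      | none => simp; omega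
      | some j =>
        obtain ⟨hji, _⟩ := lastBefore_some L i c j hocc
        by_cases hsj : s ≤ j <;> simp [hsj] <;> omega
    -- (P2) new window is Nodup
    have hP2 : (sliceW L s' (i + 1)).Nodup := by
      rw [sliceW_snoc L s' i hP1.2 h]
      have hnds' : (sliceW L s' i).Nodup := nodup_mono_start L s s' i hP1.1 hnd
      have hcnot : c ∉ sliceW L s' i := by
        intro hmem
        obtain ⟨j', hj'1, hj'2, hj'3⟩ := mem_sliceW L s' i c hmem
        obtain ⟨k, hk1, hk2⟩ := lastBefore_ge L i c j' hj'2 hj'3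
        rw [hs'def, hk1] at hj'1
        by_cases hsk : s ≤ k <;> simp [hsk] at hj'1 <;> omega
      simp [List.nodup_append, hnds']
      intro a ha hac
      rw [hac] at ha
      exact hcnot ha
    -- (P3) minimality of the new start
    have hP3 : ∀ t, t < s' → ¬ (sliceW L t (i + 1)).Nodup := by
      intro t ht
      rw [hs'def] at ht
      cases hocc : lastBefore L i c with
      | none =>
        simp only [hocc] at ht
        intro hnd'
        exact hmin t ht (nodup_mono_end L t i (by omega) hnd')
      | some j =>
        simp only [hocc] at ht
        obtain ⟨hji, hjv⟩ := lastBefore_some L i c j hocc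
        by_cases hsj : s ≤ j
        · simp only [if_pos hsj] at ht
          have hjlt : j < L.length := by omega
          have heqc : L[j]'hjlt = L[i] := by
            have := hjv
            rw [List.getElem?_eq_getElem hjlt] at this
            exact Option.some.inj this
          exact not_nodup_of_dup L t j i (by omega) hji h heqc
        · simp only [if_neg hsj] at ht
          intro hnd'
          exact hmin t ht (nodup_mono_end L t i (by omega) hnd')
    -- (P4) seen invariant for i+1
    have hP4 : ∀ c', (seen.insert c (i : Int)).get? c' =
        (lastBefore L (i + 1) c').map (fun n => (n : Int)) := by
      intro c'
      rw [PySem.Dict.get?_insert, lastBefore]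
      by_cases hcc : c' = c
      · have hgi : L[i]? = some c' := by rw [List.getElem?_eq_getElem h, hcc]
        rw [if_pos hcc, if_pos hgi]; rfl
      · have hgi : ¬ L[i]? = some c' := by
          rw [List.getElem?_eq_getElem h]
          intro hx
          exact hcc (Option.some.inj hx).symm
        rw [if_neg hcc, if_neg hgi, hseen c']
    -- the two fire conditions agree
    have hfire : ((i : Int) - (s' : Int) + 1 = 4) ↔
        (L[i - 3]'(by omega) ≠ L[i - 2]'(by omega) ∧ L[i - 3]'(by omega) ≠ L[i - 1]'(by omega) ∧
         L[i - 3]'(by omega) ≠ L[i]'h ∧ L[i - 2]'(by omega) ≠ L[i - 1]'(by omega) ∧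
         L[i - 2]'(by omega) ≠ L[i]'h ∧ L[i - 1]'(by omega) ≠ L[i]'h) := by
      constructor
      · intro hB
        have h3 : 3 ≤ i ∧ s' = i - 3 := by
          constructor <;> omega
        have := hP2
        rw [h3.2, sliceW_four L i h3.1 h] at this
        exact (nodup_four _ _ _ _).mp this
      · intro hcond
        have h3 : 3 ≤ i := by
          by_contra h3
          have e1 : i - 3 = 0 := by omega
          have e2 : i - 2 = 0 := by omega
          simp only [e1, e2] at hcond
          exact hcond.1 rfl
        have hnd4 : (sliceW L (i - 3) (i + 1)).Nodup := by
          rw [sliceW_four L i h3 h]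
          exact (nodup_four _ _ _ _).mpr hcond
        have hle : s' ≤ i - 3 := by
          by_contra hgt
          exact hP3 (i - 3) (by omega) hnd4
        have hge : i - 3 ≤ s' := by omega
        omega
    by_cases hB : (i : Int) - (s' : Int) + 1 = 4
    · rw [hstart', if_pos hB]
      conv_rhs => rw [scanGo]
      rw [dif_pos h, if_pos (hfire.mp hB)]
    · rw [hstart', if_neg hB]
      have hw' : i + 1 - s' ≤ 3 := by omega
      have hrec := altMain L (i + 1) s' (seen.insert c (i : Int))
        (by omega) hw' hP2 hP3 hP4
      rw [hrec]
      conv_rhs => rw [scanGo]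
      rw [dif_pos h, if_neg (fun hc => hB (hfire.mpr hc))]
  · rw [List.drop_eq_nil_of_le (by omega), part1AltLoop, scanGo, dif_neg h]
termination_by L.length - i

-- the scan never fires before index 3
theorem scan_low (L : List Char) (i : Nat) (h3 : i < 3) : scanGo L i = scanGo L (i + 1) := by
  by_cases h : i < L.length
  · rw [scanGo, dif_pos h, if_neg]
    intro hcond
    have e1 : i - 3 = 0 := by omega
    have e2 : i - 2 = 0 := by omega
    simp only [e1, e2] at hcond
    exact hcond.1 rfl
  · rw [scanGo, dif_neg h, scanGo, dif_neg (by omega)]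

theorem alt_eq_scan (L : List Char) :
    part1AltLoop L 0 PySem.Dict.empty 0 = scanGo L 3 := by
  have h0 := altMain L 0 0 PySem.Dict.empty (le_refl 0) (by omega)
    (by simp [sliceW]) (by omega)
    (by intro c; rw [PySem.Dict.get?_empty]; rfl)
  simp only [List.drop_zero, Nat.cast_zero] at h0
  rw [h0, scan_low L 0 (by omega), scan_low L 1 (by omega), scan_low L 2 (by omega)]

-- ===== VERDICT =====
theorem part1_spec : Claim_equal_part1 := by
  intro data _
  unfold Spec_part1 part1 part1_alt
  rw [part1_eq_scan data.toList, alt_eq_scan data.toList]
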